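-- pv_equiv track=rewrite | github.com/eutampieri/PHPBiblioDB | rcngen.py | eanCHK
-- ===== SOURCE A (Python) =====
-- def eanCHK(ean):
-- 	ean=str(ean)
-- 	count=1
-- 	chkn=0
-- 	for c in ean:
-- 		if count%2==0:
-- 			chkn=chkn+int(c)*3
-- 		else:
-- 			chkn=chkn+int(c)*1
-- 		count=count+1
-- 	if chkn%10==0:
-- 		chkn=0
-- 	else:
-- 		chkn=10-chkn%10
-- 	return ean+str(chkn)
-- ===== SOURCE B (Python) =====
-- def _wsum(s):
--     # weighted digit sum, consuming two characters at a time (weights 1, 3)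
--     if not s:
--         return 0
--     if len(s) == 1:
--         return int(s)
--     return int(s[0]) + 3 * int(s[1]) + _wsum(s[2:])
--
-- def eanCHK(ean):
--     ean = str(ean)
--     chkn = _wsum(ean)
--     chkn = 0 if chkn % 10 == 0 else 10 - chkn % 10
--     return ean + str(chkn)
-- ===== Notes on version B (the rewrite author's own statement) =====
-- stated objective: simpler
-- what changed: Replaces the counter-and-parity-branch accumulator loop with a recursive helper that consumes the digit string two characters at a time (weight 1 then weight 3), eliminating the count variable and the parity test.
import Mathlib
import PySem

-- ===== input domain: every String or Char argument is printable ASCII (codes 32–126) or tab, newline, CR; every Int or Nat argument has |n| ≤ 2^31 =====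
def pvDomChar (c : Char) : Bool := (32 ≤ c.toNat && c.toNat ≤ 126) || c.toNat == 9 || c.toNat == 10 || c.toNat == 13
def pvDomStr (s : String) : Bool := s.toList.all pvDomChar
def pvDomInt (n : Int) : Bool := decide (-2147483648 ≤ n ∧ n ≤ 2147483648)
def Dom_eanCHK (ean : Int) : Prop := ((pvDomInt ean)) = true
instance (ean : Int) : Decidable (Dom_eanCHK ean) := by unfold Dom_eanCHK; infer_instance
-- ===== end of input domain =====

-- B replaces A's counter-and-parity-branch loop with a recursive helper consuming the
-- digit string two characters at a time (weights 1 then 3); objective: simpler.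

-- ===== PORT A =====
-- one loop step of A: (count, chkn) updated by one character c; int(c) = none is ValueError
def pvStepA (st : Option (Int × Int)) (c : Char) : Option (Int × Int) :=
  st.bind fun p =>
    (PySem.Int.ofChars? [c]).map fun d =>
      if p.1 % 2 == 0 then (p.1 + 1, p.2 + d * 3) else (p.1 + 1, p.2 + d * 1)

def eanCHK (ean : Int) : String :=
  let s := PySem.Int.toStr ean
  match s.toList.foldl pvStepA (some (1, 0)) with
  | none => ""   -- int(c) raised ValueError: excluded by Pre_eanCHK
  | some p =>
      let chkn : Int := if p.2 % 10 == 0 then 0 else 10 - p.2 % 10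
      s ++ PySem.Int.toStr chkn

-- ===== PORT B =====
-- _wsum from Source B: weighted digit sum, two characters at a time
def pvWsum : List Char → Option Int
  | [] => some 0
  | [c] => PySem.Int.ofChars? [c]
  | c :: d :: rest => do
      let a ← PySem.Int.ofChars? [c]
      let b ← PySem.Int.ofChars? [d]
      let r ← pvWsum rest
      pure (a + 3 * b + r)

def eanCHK_alt (ean : Int) : String :=
  let s := PySem.Int.toStr ean
  match pvWsum s.toList with
  | none => ""   -- int() raised ValueError: excluded by Pre_eanCHK
  | some w =>
      let chkn : Int := if w % 10 == 0 then 0 else 10 - w % 10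
      s ++ PySem.Int.toStr chkn

-- ===== PRECONDITION & SPEC =====
-- Pre_ excludes negative ean, where str(ean) starts with '-' and int('-') raises ValueError in both A and B.
def Pre_eanCHK (ean : Int) : Prop := 0 ≤ ean
instance (ean : Int) : Decidable (Pre_eanCHK ean) := by unfold Pre_eanCHK; infer_instance
def pvWitness_eanCHK : Int := 97802

def Spec_eanCHK (ean : Int) (out : String) : Prop := out = eanCHK_alt ean
instance (ean : Int) (out : String) : Decidable (Spec_eanCHK ean out) := by unfold Spec_eanCHK; infer_instance

-- ===== CLAIM (what is proved, stated in full; the proofs are below) =====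
def Claim_equal_eanCHK : Prop := ∀ (ean : Int), Dom_eanCHK ean → Pre_eanCHK ean → Spec_eanCHK ean (eanCHK ean)

-- ===== LEMMAS AND PROOFS =====

lemma pvFoldA_none (cs : List Char) : cs.foldl pvStepA none = none := by
  induction cs with
  | nil => rfl
  | cons c cs ih => simpa [pvStepA] using ih

lemma pvFoldA_eq (cs : List Char) (cnt a : Int) (h : cnt % 2 = 1) :
    cs.foldl pvStepA (some (cnt, a)) =
      (pvWsum cs).map fun w => (cnt + cs.length, a + w) := by
  induction cs using pvWsum.induct generalizing cnt a with
  | case1 =>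
      simp [pvWsum]
  | case2 c =>
      have hcnt : (cnt % 2 == 0) = false := by simp only [beq_eq_false_iff_ne, ne_eq]; omega
      cases hc : PySem.Int.ofChars? [c] with
      | none =>
          simp [List.foldl, pvWsum, pvStepA, hc]
      | some d =>
          simp only [List.foldl_cons, List.foldl_nil, pvStepA, hc, hcnt, pvWsum,
            Option.bind_some, Option.map_some, Bool.false_eq_true, if_false,
            List.length_cons, List.length_nil, Option.some.injEq, Prod.mk.injEq]
          constructor <;> ring
  | case3 c d rest ih =>
      have hcnt : (cnt % 2 == 0) = false := by simp only [beq_eq_false_iff_ne, ne_eq]; omega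
      have hcnt1 : ((cnt + 1) % 2 == 0) = true := by simp only [beq_iff_eq]; omega
      cases hc : PySem.Int.ofChars? [c] with
      | none =>
          simp [List.foldl, pvWsum, pvStepA, hc, pvFoldA_none]
      | some e =>
          cases hd : PySem.Int.ofChars? [d] with
          | none =>
              simp [List.foldl, pvWsum, pvStepA, hc, hd, pvFoldA_none]
          | some f =>
              have h1 : pvStepA (some (cnt, a)) c = some (cnt + 1, a + e * 1) := by
                simp only [pvStepA, hc, Option.bind_some, Option.map_some, hcnt,
                  Bool.false_eq_true, if_false]
              have h2 : pvStepA (some (cnt + 1, a + e * 1)) d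
                  = some (cnt + 1 + 1, a + e * 1 + f * 3) := by
                simp only [pvStepA, hd, Option.bind_some, Option.map_some, hcnt1, if_true]
              have key := ih (cnt + 1 + 1) (a + e * 1 + f * 3) (by omega)
              show List.foldl pvStepA (pvStepA (pvStepA (some (cnt, a)) c) d) rest = _
              rw [h1, h2, key]
              cases hr : pvWsum rest with
              | none => simp [pvWsum, hc, hd, hr]
              | some r =>
                  simp [pvWsum, hc, hd, hr]
                  push_cast
                  refine ⟨by ring, by ring⟩

-- ===== VERDICT (by name: the statement is the Claim_ definition above) =====
theorem eanCHK_spec : Claim_equal_eanCHK := by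
  intro ean _ _
  show eanCHK ean = eanCHK_alt ean
  have hfold := pvFoldA_eq (PySem.Int.toStr ean).toList 1 0 (by decide)
  simp only [eanCHK, eanCHK_alt, hfold]
  cases h : pvWsum (PySem.Int.toStr ean).toList with
  | none => simp
  | some w => simp
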